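-- pv_equiv track=rewrite | github.com/tejaswi0905/DSA-Python | Code_forces_sparring/prefix-sum/ranking_system.py | solve
-- ===== SOURCE A (Python) =====
-- def solve(a):
--     n = len(a)
--     if n == 0:
--         return 0
--
--     # compute prefix sums
--     pa = [0] * n
--     pa[0] = a[0]
--     for i in range(1, n):
--         pa[i] = pa[i-1] + a[i]
--
--     suf_max = float('-inf')  # max of pa[j] for j >= current i
--     ans = 0
--     k = None                  # initialize with 0 to handle all-negative arrays
--
--     # traverse from right to left
--     for i in range(n-1, 0, -1):
--         suf_max = max(suf_max, pa[i])   # update suffix max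
--         if pa[i-1] > pa[i]:             # found a drop
--             gain = max(0, suf_max - pa[i])  # only add positive gain
--             new_ans = ans + gain
--             if new_ans > ans:
--                 ans = new_ans
--                 k = pa[i - 1]
--
--     return k if k else 0
-- ===== SOURCE B (Python) =====
-- def solve(a):
--     if not a:
--         return 0
--     n = len(a)
--     pa = []
--     s = 0
--     for x in a:
--         s += x
--         pa.append(s)
--     suf = [0] * n
--     suf[n - 1] = pa[n - 1]
--     for i in range(n - 2, -1, -1):
--         suf[i] = max(pa[i], suf[i + 1])
--     for i in range(1, n):
--         if pa[i - 1] > pa[i] and suf[i] > pa[i]: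
--             return pa[i - 1]
--     return 0
-- ===== Notes on version B (the rewrite author's own statement) =====
-- stated objective: simpler
-- what changed: B drops A's dead ans/new_ans accumulation and the in-place replicate/set prefix array, builds the prefix sums forward and a suffix-maximum array in one right-to-left pass, then returns at the FIRST forward index with a drop and positive gain instead of A's reverse scan whose last overwrite picks that index.
import Mathlib
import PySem

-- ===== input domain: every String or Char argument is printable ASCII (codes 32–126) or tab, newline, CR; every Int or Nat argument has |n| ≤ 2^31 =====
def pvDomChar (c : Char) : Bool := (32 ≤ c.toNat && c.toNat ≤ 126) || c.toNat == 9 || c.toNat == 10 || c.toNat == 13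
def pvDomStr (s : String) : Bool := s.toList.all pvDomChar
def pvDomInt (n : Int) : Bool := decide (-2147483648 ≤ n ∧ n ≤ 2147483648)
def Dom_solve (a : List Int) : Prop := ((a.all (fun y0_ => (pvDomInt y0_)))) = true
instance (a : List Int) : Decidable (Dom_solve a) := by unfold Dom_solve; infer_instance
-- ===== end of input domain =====

-- B replaces A's reverse scan (running suffix max + dead ans/new_ans accumulator, last overwrite wins)
-- by a precomputed suffix-maximum array and a forward scan returning at the first qualifying index.

-- ===== PORT A =====
-- suf_max = float('-inf') is modelled as `none` of Option Int; it is only read after being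
-- updated to a finite value, so this is exact. All list indices below are in range, so
-- `getD` is exact for Python's a[i]/pa[i].
-- loop body of A's right-to-left scan, state = (suf_max, ans, k)
def stepA (pa : List Int) (st : Option Int × Int × Option Int) (i : Nat) :
    Option Int × Int × Option Int :=
  let sm : Option Int := some (match st.1 with
    | none => pa.getD i 0
    | some m => max m (pa.getD i 0))
  if pa.getD (i - 1) 0 > pa.getD i 0 then
    let gain := max 0 (sm.getD 0 - pa.getD i 0)
    let newAns := st.2.1 + gain
    if newAns > st.2.1 then (sm, newAns, some (pa.getD (i - 1) 0))
    else (sm, st.2.1, st.2.2)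
  else (sm, st.2.1, st.2.2)

def solve (a : List Int) : Int :=
  let n := a.length
  if n = 0 then 0
  else
    -- pa = [0]*n; pa[0] = a[0]; for i in range(1, n): pa[i] = pa[i-1] + a[i]
    let pa0 := (List.replicate n (0 : Int)).set 0 (a.getD 0 0)
    let pa := (List.range' 1 (n - 1)).foldl
      (fun pa i => pa.set i (pa.getD (i - 1) 0 + a.getD i 0)) pa0
    -- for i in range(n-1, 0, -1) with state (suf_max, ans, k)
    let st := ((List.range' 1 (n - 1)).reverse).foldl (stepA pa) (none, 0, none)
    -- return k if k else 0
    match st.2.2 with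
    | none => 0
    | some v => if v = 0 then 0 else v

-- ===== PORT B =====
def solve_alt (a : List Int) : Int :=
  if a = [] then 0
  else
    let n := a.length
    -- pa built forward by accumulation
    let pa := (a.foldl (fun (st : List Int × Int) x => (st.1 ++ [st.2 + x], st.2 + x)) ([], 0)).1
    -- suf = [0]*n; suf[n-1] = pa[n-1]; for i in range(n-2, -1, -1): suf[i] = max(pa[i], suf[i+1])
    let suf0 := (List.replicate n (0 : Int)).set (n - 1) (pa.getD (n - 1) 0)
    let suf := ((List.range' 0 (n - 1)).reverse).foldl
      (fun suf i => suf.set i (max (pa.getD i 0) (suf.getD (i + 1) 0))) suf0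
    -- for i in range(1, n): if pa[i-1] > pa[i] and suf[i] > pa[i]: return pa[i-1]
    match (List.range' 1 (n - 1)).find?
        (fun i => decide (pa.getD (i - 1) 0 > pa.getD i 0) && decide (suf.getD i 0 > pa.getD i 0)) with
    | some i => pa.getD (i - 1) 0
    | none => 0

-- ===== PRECONDITION & SPEC =====
def Spec_solve (a : List Int) (out : Int) : Prop := out = solve_alt a
instance (a : List Int) (out : Int) : Decidable (Spec_solve a out) := by unfold Spec_solve; infer_instance

-- ===== CLAIM (what is proved, stated in full; the proofs are below) =====
def Claim_equal_solve : Prop := ∀ (a : List Int), Dom_solve a → Spec_solve a (solve a)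

-- ===== LEMMAS AND PROOFS =====

-- canonical prefix-sum list
def pfx (s : Int) : List Int → List Int
  | [] => []
  | x :: xs => (s + x) :: pfx (s + x) xs

-- maximum of a list as an Option (none on [])
def smO : List Int → Option Int
  | [] => none
  | x :: xs => some (match smO xs with | none => x | some m => max x m)

theorem pfx_length (s : Int) (l : List Int) : (pfx s l).length = l.length := by
  induction l generalizing s with
  | nil => rfl
  | cons x xs ih => simp [pfx, ih]

theorem pfx_step (s : Int) (l : List Int) (i : Nat) (h : i + 1 < l.length) :
    (pfx s l).getD (i + 1) 0 = (pfx s l).getD i 0 + l.getD (i + 1) 0 := by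
  induction l generalizing s i with
  | nil => simp at h
  | cons x xs ih =>
    cases i with
    | zero =>
      simp at h
      cases xs with
      | nil => simp at h
      | cons y ys => simp [pfx]
    | succ j =>
      simp at h
      simpa [pfx] using ih (s + x) j h

theorem bfold_pa (l : List Int) (acc : List Int) (s : Int) :
    (l.foldl (fun (st : List Int × Int) x => (st.1 ++ [st.2 + x], st.2 + x)) (acc, s)).1
      = acc ++ pfx s l := by
  induction l generalizing acc s with
  | nil => simp [pfx]
  | cons x xs ih => simp [pfx, ih]

theorem afold_pa (a : List Int) (ha : a ≠ []) (m : Nat) (hm : m < a.length) :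
    (List.range' 1 m).foldl
      (fun pa i => pa.set i (pa.getD (i - 1) 0 + a.getD i 0))
      ((List.replicate a.length (0 : Int)).set 0 (a.getD 0 0))
      = (pfx 0 a).take (m + 1) ++ List.replicate (a.length - (m + 1)) 0 := by
  induction m with
  | zero =>
    cases a with
    | nil => simp at ha
    | cons x xs => simp [pfx, List.replicate_succ]
  | succ m ih =>
    have hm' : m < a.length := Nat.lt_of_succ_lt hm
    have hP : (pfx 0 a).length = a.length := pfx_length 0 a
    rw [List.range'_1_concat, List.foldl_append, ih hm', List.foldl_cons, List.foldl_nil]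
    have hlen1 : ((pfx 0 a).take (m + 1)).length = m + 1 := by
      rw [List.length_take]; omega
    have hget : ((pfx 0 a).take (m + 1) ++ List.replicate (a.length - (m + 1)) 0).getD ((1 + m) - 1) 0
        = (pfx 0 a).getD m 0 := by
      have h1 : (1 + m) - 1 = m := by omega
      rw [h1, List.getD_append _ _ _ _ (by omega)]
      simp [List.getD_eq_getElem?_getD, List.getElem?_take_of_lt (show m < m+1 by omega)]
    rw [hget]
    have hval : (pfx 0 a).getD m 0 + a.getD (1 + m) 0 = (pfx 0 a).getD (m + 1) 0 := by
      have := pfx_step 0 a m (by omega)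
      rw [show (1 + m) = m + 1 from by omega, this]
    rw [hval]
    have hrep : List.replicate (a.length - (m + 1)) (0 : Int)
        = 0 :: List.replicate (a.length - (m + 2)) 0 := by
      rw [show a.length - (m + 1) = (a.length - (m + 2)) + 1 from by omega, List.replicate_succ]
    rw [hrep]
    rw [show (1 + m) = ((pfx 0 a).take (m + 1)).length + 0 from by omega]
    rw [List.set_append_right _ _ (by omega)]
    simp only [Nat.add_sub_cancel_left, List.set_cons_zero]
    have hsome : (pfx 0 a)[m + 1]? = some ((pfx 0 a).getD (m + 1) 0) := by
      rw [List.getD_eq_getElem _ _ (by omega)]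
      exact List.getElem?_eq_getElem (by omega)
    have htake : (pfx 0 a).take (m + 1 + 1) = (pfx 0 a).take (m + 1) ++ [(pfx 0 a).getD (m + 1) 0] := by
      rw [List.take_add_one, hsome]; rfl
    rw [htake]
    simp

theorem smO_drop (P : List Int) (i : Nat) (h : i < P.length) :
    smO (P.drop i) = some (match smO (P.drop (i + 1)) with
      | none => P.getD i 0
      | some m => max (P.getD i 0) m) := by
  rw [List.drop_eq_getElem_cons h, List.getD_eq_getElem P 0 h]
  rfl

theorem suf_fold (P : List Int) (n : Nat) (hn : P.length = n) (m : Nat) (hm : m ≤ n - 1)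
    (suf : List Int) (hlen : suf.length = n)
    (hinv : ∀ j, m ≤ j → j < n → suf.getD j 0 = (smO (P.drop j)).getD 0) :
    ∀ j, j < n →
      (((List.range' 0 m).reverse).foldl
        (fun suf i => suf.set i (max (P.getD i 0) (suf.getD (i + 1) 0))) suf).getD j 0
      = (smO (P.drop j)).getD 0 := by
  induction m generalizing suf with
  | zero =>
    intro j hj
    simpa using hinv j (Nat.zero_le j) hj
  | succ m ih =>
    rw [List.range'_1_concat, List.reverse_append]
    simp only [List.reverse_cons, List.reverse_nil, List.nil_append, List.cons_append,
      List.foldl_cons, Nat.zero_add]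
    obtain ⟨v, hv⟩ : ∃ v, smO (P.drop (m + 1)) = some v :=
      ⟨_, smO_drop P (m + 1) (by omega)⟩
    apply ih (by omega)
    · simpa using hlen
    · intro j hj1 hj2
      rcases Nat.eq_or_lt_of_le hj1 with hj | hj
      · subst hj
        have hset : ((suf.set m (max (P.getD m 0) (suf.getD (m + 1) 0))).getD m 0)
            = max (P.getD m 0) (suf.getD (m + 1) 0) := by
          have hms : m < suf.length := by omega
          simp [List.getD_eq_getElem?_getD, hms]
        rw [hset, hinv (m + 1) (by omega) (by omega), hv]
        rw [smO_drop P m (by omega), hv]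
        rfl
      · have hset : ((suf.set m (max (P.getD m 0) (suf.getD (m + 1) 0))).getD j 0)
            = suf.getD j 0 := by
          simp [List.getD_eq_getElem?_getD, List.getElem?_set_ne (show m ≠ j by omega)]
        rw [hset]
        exact hinv j (by omega) hj2

theorem find?_congr' {α : Type} (l : List α) (p q : α → Bool)
    (h : ∀ x ∈ l, p x = q x) : l.find? p = l.find? q := by
  induction l with
  | nil => rfl
  | cons x xs ih =>
    simp only [List.find?]
    rw [h x (by simp)]
    cases q x with
    | true => rfl
    | false => exact ih (fun y hy => h y (by simp [hy]))

def condB (P : List Int) (i : Nat) : Bool :=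
  decide (P.getD (i - 1) 0 > P.getD i 0) && decide ((smO (P.drop i)).getD 0 > P.getD i 0)

theorem aloop (P : List Int) (n : Nat) (hn : P.length = n) (m : Nat) (hm : m + 1 ≤ n)
    (ans : Int) (k : Option Int) :
    (((List.range' 1 m).reverse).foldl (stepA P) (smO (P.drop (m + 1)), ans, k)).2.2
    = match (List.range' 1 m).find? (condB P) with
      | some i => some (P.getD (i - 1) 0)
      | none => k := by
  induction m generalizing ans k with
  | zero => simp
  | succ m ih =>
    have hm1 : m + 1 < P.length := by omega
    obtain ⟨v, hv⟩ : ∃ v, smO (P.drop (m + 1)) = some v := ⟨_, smO_drop P (m + 1) hm1⟩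
    rw [List.range'_1_concat, List.reverse_append, List.find?_append]
    simp only [List.reverse_cons, List.reverse_nil, List.nil_append, List.cons_append,
      List.foldl_cons, Nat.add_comm 1 m]
    have hsm : (some (match smO (P.drop (m + 1 + 1)) with
        | none => P.getD (m + 1) 0
        | some mm => max mm (P.getD (m + 1) 0)) : Option Int) = smO (P.drop (m + 1)) := by
      rw [smO_drop P (m + 1) hm1]
      cases smO (P.drop (m + 1 + 1)) <;> simp [max_comm]
    by_cases h1 : P.getD (m + 1 - 1) 0 > P.getD (m + 1) 0
    · by_cases h2 : v > P.getD (m + 1) 0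
      · have hstate : stepA P (smO (P.drop (m + 1 + 1)), ans, k) (m + 1)
            = (smO (P.drop (m + 1)), ans + max 0 (v - P.getD (m + 1) 0), some (P.getD (m + 1 - 1) 0)) := by
          simp only [stepA, hsm, hv, Option.getD_some]
          rw [if_pos h1, if_pos (by omega)]
        rw [hstate, ih (by omega)]
        have hc : condB P (m + 1) = true := by
          unfold condB; rw [hv]
          simp only [Option.getD_some, Bool.and_eq_true, decide_eq_true_eq]
          exact ⟨h1, h2⟩
        have hend : List.find? (condB P) [m + 1] = some (m + 1) := by
          simp [List.find?, hc]
        rw [hend]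
        cases List.find? (condB P) (List.range' 1 m) <;> simp
      · have hstate : stepA P (smO (P.drop (m + 1 + 1)), ans, k) (m + 1)
            = (smO (P.drop (m + 1)), ans, k) := by
          simp only [stepA, hsm, hv, Option.getD_some]
          rw [if_pos h1, if_neg (by omega)]
        rw [hstate, ih (by omega)]
        have hc : condB P (m + 1) = false := by
          unfold condB; rw [hv]
          simp only [List.getD_eq_getElem?_getD] at h2
          simp
          intro _
          omega
        have hend : List.find? (condB P) [m + 1] = none := by
          simp [List.find?, hc]
        rw [hend]
        cases List.find? (condB P) (List.range' 1 m) <;> simp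
    · have hstate : stepA P (smO (P.drop (m + 1 + 1)), ans, k) (m + 1)
          = (smO (P.drop (m + 1)), ans, k) := by
        simp only [stepA, hsm, hv, Option.getD_some]
        rw [if_neg h1]
      rw [hstate, ih (by omega)]
      have hc : condB P (m + 1) = false := by
        unfold condB
        simp only [List.getD_eq_getElem?_getD, Nat.add_sub_cancel] at h1
        simp
        intro h
        omega
      have hend : List.find? (condB P) [m + 1] = none := by
        simp [List.find?, hc]
      rw [hend]
      cases List.find? (condB P) (List.range' 1 m) <;> simp

theorem solveA_eq (a : List Int) (ha : a ≠ []) :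
    solve a = (match (List.range' 1 (a.length - 1)).find? (condB (pfx 0 a)) with
      | some i => (if (pfx 0 a).getD (i - 1) 0 = 0 then 0 else (pfx 0 a).getD (i - 1) 0)
      | none => 0) := by
  have hn1 : 1 ≤ a.length := by
    cases a with
    | nil => simp at ha
    | cons x xs => simp
  have hP : (pfx 0 a).length = a.length := pfx_length 0 a
  simp only [solve]
  rw [if_neg (by omega)]
  have hpa : (List.range' 1 (a.length - 1)).foldl
      (fun pa i => pa.set i (pa.getD (i - 1) 0 + a.getD i 0))
      ((List.replicate a.length (0 : Int)).set 0 (a.getD 0 0)) = pfx 0 a := by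
    rw [afold_pa a ha (a.length - 1) (by omega)]
    rw [show a.length - 1 + 1 = a.length from by omega]
    rw [show (pfx 0 a).take a.length = pfx 0 a from by
      rw [← hP]; exact List.take_length]
    simp
  rw [hpa]
  have hinit : ((none : Option Int), (0 : Int), (none : Option Int))
      = (smO ((pfx 0 a).drop (a.length - 1 + 1)), (0 : Int), (none : Option Int)) := by
    rw [show a.length - 1 + 1 = a.length from by omega, ← hP, List.drop_length]
    rfl
  rw [hinit, aloop (pfx 0 a) a.length hP (a.length - 1) (by omega)]
  cases (List.range' 1 (a.length - 1)).find? (condB (pfx 0 a)) <;> rfl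

theorem solveB_eq (a : List Int) (ha : a ≠ []) :
    solve_alt a = (match (List.range' 1 (a.length - 1)).find? (condB (pfx 0 a)) with
      | some i => (pfx 0 a).getD (i - 1) 0
      | none => 0) := by
  have hn1 : 1 ≤ a.length := by
    cases a with
    | nil => simp at ha
    | cons x xs => simp
  have hP : (pfx 0 a).length = a.length := pfx_length 0 a
  simp only [solve_alt]
  rw [if_neg ha]
  rw [bfold_pa a [] 0, List.nil_append]
  have hsuf : ∀ j, j < a.length →
      (((List.range' 0 (a.length - 1)).reverse).foldl
        (fun suf i => suf.set i (max ((pfx 0 a).getD i 0) (suf.getD (i + 1) 0)))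
        ((List.replicate a.length (0 : Int)).set (a.length - 1) ((pfx 0 a).getD (a.length - 1) 0))).getD j 0
      = (smO ((pfx 0 a).drop j)).getD 0 := by
    apply suf_fold (pfx 0 a) a.length hP (a.length - 1) (by omega)
    · simp
    · intro j hj1 hj2
      have hj : j = a.length - 1 := by omega
      subst hj
      have hlt : a.length - 1 < (List.replicate a.length (0 : Int)).length := by simp; omega
      have hset : ((List.replicate a.length (0 : Int)).set (a.length - 1)
          ((pfx 0 a).getD (a.length - 1) 0)).getD (a.length - 1) 0
          = (pfx 0 a).getD (a.length - 1) 0 := by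
        simp only [List.getD_eq_getElem?_getD]
        rw [List.getElem?_set_self (by simpa using hlt)]
        rfl
      rw [hset, smO_drop (pfx 0 a) (a.length - 1) (by omega)]
      rw [show a.length - 1 + 1 = a.length from by omega, ← hP, List.drop_length]
      rfl
  have hfind : (List.range' 1 (a.length - 1)).find?
      (fun i => decide ((pfx 0 a).getD (i - 1) 0 > (pfx 0 a).getD i 0) &&
        decide ((((List.range' 0 (a.length - 1)).reverse).foldl
          (fun suf i => suf.set i (max ((pfx 0 a).getD i 0) (suf.getD (i + 1) 0)))
          ((List.replicate a.length (0 : Int)).set (a.length - 1) ((pfx 0 a).getD (a.length - 1) 0))).getD i 0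
          > (pfx 0 a).getD i 0))
      = (List.range' 1 (a.length - 1)).find? (condB (pfx 0 a)) := by
    apply find?_congr'
    intro i hi
    have hi' : 1 ≤ i ∧ i < 1 + (a.length - 1) := List.mem_range'_1.mp hi
    rw [hsuf i (by omega)]
    rfl
  rw [hfind]

-- ===== VERDICT (by name: the statement is the Claim_ definition above) =====
theorem solve_spec : Claim_equal_solve := by
  unfold Claim_equal_solve
  intro a _
  unfold Spec_solve
  by_cases ha : a = []
  · subst ha; rfl
  · rw [solveA_eq a ha, solveB_eq a ha]
    cases (List.range' 1 (a.length - 1)).find? (condB (pfx 0 a)) with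
    | none => rfl
    | some i =>
      show (if (pfx 0 a).getD (i - 1) 0 = 0 then 0 else (pfx 0 a).getD (i - 1) 0)
          = (pfx 0 a).getD (i - 1) 0
      by_cases hz : (pfx 0 a).getD (i - 1) 0 = 0
      · rw [if_pos hz]; exact hz.symm
      · rw [if_neg hz]
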